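-- pv_equiv track=rewrite | github.com/sejongbinary/binary-ps-advanced-2024-winter | programmers/힙.더맵게/mingxoxo.py | solution
-- ===== SOURCE A (Python) =====
-- from heapq import heapify, heappush, heappop
--
-- def solution(scoville, K):
--     answer = 0
--     heapify(scoville) # 최소힙으로 재배열
--
--     while 1 < len(scoville) and scoville[0] < K:
--         heappush(scoville, heappop(scoville) + heappop(scoville) * 2)
--         answer += 1
--
--     # 모든 음식의 스코빌 지수를 K 이상으로 만들 수 없는 경우 -1
--     if scoville[0] < K:
--         return -1
--     return answer
-- ===== SOURCE B (Python) =====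
-- def solution(scoville, K):
--     # Two-queue merge (heap-free): sorted originals + FIFO of combined values,
--     # which are produced in nondecreasing order, so the minimum is always at
--     # one of the two queue fronts.  Return value only: A heapifies the caller's
--     # list in place, B leaves it unmodified.
--     orig = sorted(scoville)
--     gen = []          # combined values, appended in nondecreasing order
--     i = j = 0         # queue heads
--     answer = 0
--
--     def take_orig():
--         return j == len(gen) or (i < len(orig) and orig[i] <= gen[j])
--
--     while (len(orig) - i) + (len(gen) - j) > 1:
--         first = orig[i] if take_orig() else gen[j]
--         if first >= K:
--             break
--         if take_orig():
--             a = orig[i]; i += 1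
--         else:
--             a = gen[j]; j += 1
--         if take_orig():
--             b = orig[i]; i += 1
--         else:
--             b = gen[j]; j += 1
--         gen.append(a + 2 * b)
--         answer += 1
--     first = orig[i] if take_orig() else gen[j]
--     return -1 if first < K else answer
-- ===== Notes on version B (the rewrite author's own statement) =====
-- stated objective: alternative
-- what changed: Replaces the binary min-heap with the heap-free two-queue merge: sort once, keep a FIFO of combined values (provably produced in nondecreasing order), and take each minimum in O(1) from one of the two queue fronts instead of maintaining a priority structure; return value only, since A heapifies the caller's list in place while B leaves it unmodified.
-- outside the precondition, e.g. on solution([], 5): A raises IndexError, B raises IndexError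
import Mathlib
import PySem

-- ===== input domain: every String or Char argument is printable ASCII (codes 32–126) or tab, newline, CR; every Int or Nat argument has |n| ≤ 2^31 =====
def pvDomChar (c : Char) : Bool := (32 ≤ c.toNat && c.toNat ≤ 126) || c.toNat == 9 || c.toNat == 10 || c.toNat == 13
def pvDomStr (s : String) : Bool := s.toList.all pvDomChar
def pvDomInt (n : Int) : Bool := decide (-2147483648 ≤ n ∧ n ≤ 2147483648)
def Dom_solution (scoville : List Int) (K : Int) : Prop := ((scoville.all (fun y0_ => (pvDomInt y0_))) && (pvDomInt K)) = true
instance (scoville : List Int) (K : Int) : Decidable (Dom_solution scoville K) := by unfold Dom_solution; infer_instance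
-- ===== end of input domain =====

-- B replaces the min-heap by the heap-free two-queue merge (sorted originals + FIFO of combined
-- values, minima read off the two queue fronts); return value only — A heapifies/mutates the
-- caller's list in place, B leaves it untouched.

-- ===== PORT A =====
-- heapq on Int is ported by its exact value contract: the heap top is the minimum
-- element, heappop removes one occurrence of the minimum, heappush adds an element.
def heapTop (l : List Int) : Int := (PySem.List.min? l (fun x => x)).getD 0

def solutionLoop (K : Int) : Nat → List Int → Int → Int
  | fuel+1, l, ans =>
      if 1 < l.length ∧ heapTop l < K then
        -- heappush(scoville, heappop(scoville) + heappop(scoville) * 2); answer += 1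
        -- (first pop = heapTop l, second pop = heapTop of the remainder)
        solutionLoop K fuel
          ((heapTop l + heapTop (l.erase (heapTop l)) * 2) ::
            ((l.erase (heapTop l)).erase (heapTop (l.erase (heapTop l))))) (ans + 1)
      else if heapTop l < K then -1 else ans
  | 0, l, ans => if heapTop l < K then -1 else ans

def solution (scoville : List Int) (K : Int) : Int :=
  solutionLoop K scoville.length scoville 0

-- ===== PORT B =====
-- the queues are ported as the lists of their not-yet-consumed elements (orig[i:], gen[j:])
-- 'first = orig[i] if take_orig() else gen[j]'  (0 is returned only on the empty pool,
-- where the Python raises IndexError — excluded by Pre_)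
def bMin : List Int → List Int → Int
  | o :: _, []     => o
  | o :: _, g :: _ => if o ≤ g then o else g
  | [],     g :: _ => g
  | [],     []     => 0

-- one 'take_orig()' pop: the popped value and the two remaining queues
def bPop : List Int → List Int → Int × List Int × List Int
  | o :: os, []      => (o, os, [])
  | o :: os, g :: gs => if o ≤ g then (o, os, g :: gs) else (g, o :: os, gs)
  | [],      g :: gs => (g, [], gs)
  | [],      []      => (0, [], [])

def bLoop (K : Int) : Nat → List Int → List Int → Int → Int
  | fuel+1, O, G, ans =>
      if 1 < O.length + G.length ∧ bMin O G < K then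
        let p1 := bPop O G
        let p2 := bPop p1.2.1 p1.2.2
        bLoop K fuel p2.2.1 (p2.2.2 ++ [p1.1 + 2 * p2.1]) (ans + 1)
      else if bMin O G < K then -1 else ans
  | 0, O, G, ans => if bMin O G < K then -1 else ans

def solution_alt (scoville : List Int) (K : Int) : Int :=
  bLoop K scoville.length (PySem.List.sorted scoville (fun x => x) false) [] 0

-- ===== PRECONDITION & SPEC =====
-- A raises IndexError on scoville = [] (scoville[0] after the loop); excluded.
def Pre_solution (scoville : List Int) (K : Int) : Prop := scoville ≠ []
instance (scoville : List Int) (K : Int) : Decidable (Pre_solution scoville K) := by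
  unfold Pre_solution; infer_instance

def pvWitness_solution : List Int × Int := ([1, 2, 3, 9, 10, 12], 7)

def Spec_solution (scoville : List Int) (K : Int) (out : Int) : Prop := out = solution_alt scoville K
instance (scoville : List Int) (K : Int) (out : Int) : Decidable (Spec_solution scoville K out) := by unfold Spec_solution; infer_instance

-- ===== CLAIM (what is proved, stated in full; the proofs are below) =====
def Claim_equal_solution : Prop := ∀ (scoville : List Int) (K : Int), Dom_solution scoville K → Pre_solution scoville K → Spec_solution scoville K (solution scoville K)

-- ===== LEMMAS AND PROOFS =====

-- reference merged pool of the two queues (proof-side only)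
def mrg : List Int → List Int → List Int
  | [], G => G
  | o :: os, [] => o :: os
  | o :: os, g :: gs => if o ≤ g then o :: mrg os (g :: gs) else g :: mrg (o :: os) gs

-- the per-element invariant of the generated queue: every generated value w is bounded by
-- x + 2y, where x, y are the two smallest pool elements besides w
def InvG (G M : List Int) : Prop :=
  ∀ w ∈ G, ∀ x y r, M.erase w = x :: y :: r → w ≤ x + 2 * y

theorem mrg_perm : ∀ (O G : List Int), (mrg O G).Perm (O ++ G)
  | [], G => by simp [mrg]
  | o :: os, [] => by simp [mrg]
  | o :: os, g :: gs => by
      rw [mrg]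
      split
      · exact (mrg_perm os (g :: gs)).cons o
      · refine ((mrg_perm (o :: os) gs).cons g).trans ?_
        exact (List.perm_middle).symm

theorem mem_mrg {x : Int} {O G : List Int} (h : x ∈ mrg O G) : x ∈ O ∨ x ∈ G := by
  have := (mrg_perm O G).mem_iff.mp h
  simpa using this

theorem mrg_pairwise : ∀ (O G : List Int), O.Pairwise (· ≤ ·) → G.Pairwise (· ≤ ·) →
    (mrg O G).Pairwise (· ≤ ·)
  | [], G, _, hG => by simpa [mrg] using hG
  | o :: os, [], hO, _ => by simpa [mrg] using hO
  | o :: os, g :: gs, hO, hG => by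
      rw [mrg]
      split
      · rename_i hle
        refine List.pairwise_cons.mpr ⟨?_, mrg_pairwise os (g :: gs) hO.of_cons hG⟩
        intro x hx
        rcases mem_mrg hx with hx | hx
        · exact (List.pairwise_cons.mp hO).1 x hx
        · rcases List.mem_cons.mp hx with rfl | hx
          · exact hle
          · exact le_trans hle ((List.pairwise_cons.mp hG).1 x hx)
      · rename_i hle
        rw [not_le] at hle
        refine List.pairwise_cons.mpr ⟨?_, mrg_pairwise (o :: os) gs hO hG.of_cons⟩
        intro x hx
        rcases mem_mrg hx with hx | hx
        · rcases List.mem_cons.mp hx with rfl | hx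
          · exact le_of_lt hle
          · exact le_trans (le_of_lt hle) ((List.pairwise_cons.mp hO).1 x hx)
        · exact (List.pairwise_cons.mp hG).1 x hx

theorem bPop_spec : ∀ (O G : List Int) (m : Int) (M' : List Int), mrg O G = m :: M' →
    (bPop O G).1 = m ∧ mrg (bPop O G).2.1 (bPop O G).2.2 = M'
  | [], g :: gs, m, M' => by
      intro h; rw [mrg] at h; cases h; exact ⟨rfl, by simp [bPop, mrg]⟩
  | o :: os, [], m, M' => by
      intro h; rw [mrg] at h; cases h
      refine ⟨rfl, ?_⟩
      cases os <;> simp [bPop, mrg]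
  | o :: os, g :: gs, m, M' => by
      intro h
      rw [mrg] at h
      by_cases hle : o ≤ g
      · rw [if_pos hle] at h; cases h; simp [bPop, hle]
      · rw [if_neg hle] at h; cases h; simp [bPop, hle]
  | [], [], m, M' => by intro h; rw [mrg] at h; cases h

theorem bMin_mrg {O G : List Int} {m : Int} {M' : List Int} (h : mrg O G = m :: M') :
    bMin O G = m := by
  match O, G with
  | [], g :: gs => rw [mrg] at h; cases h; rfl
  | o :: os, [] => rw [mrg] at h; cases h; rfl
  | o :: os, g :: gs =>
      rw [mrg] at h
      by_cases hle : o ≤ g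
      · rw [if_pos hle] at h; cases h; simp [bMin, hle]
      · rw [if_neg hle] at h; cases h; simp [bMin, hle]
  | [], [] => rw [mrg] at h; cases h

theorem bPop_pairwise {O G : List Int} (hO : O.Pairwise (· ≤ ·)) (hG : G.Pairwise (· ≤ ·)) :
    (bPop O G).2.1.Pairwise (· ≤ ·) ∧ (bPop O G).2.2.Pairwise (· ≤ ·) := by
  match O, G with
  | [], [] => exact ⟨List.Pairwise.nil, List.Pairwise.nil⟩
  | [], g :: gs => exact ⟨List.Pairwise.nil, hG.of_cons⟩
  | o :: os, [] => exact ⟨hO.of_cons, List.Pairwise.nil⟩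
  | o :: os, g :: gs =>
      by_cases hle : o ≤ g
      · simp only [bPop, if_pos hle]; exact ⟨hO.of_cons, hG⟩
      · simp only [bPop, if_neg hle]; exact ⟨hO, hG.of_cons⟩

theorem bPop_mem_gen {O G : List Int} {w : Int} (h : w ∈ (bPop O G).2.2) : w ∈ G := by
  match O, G with
  | [], [] => simpa [bPop] using h
  | [], g :: gs => simp only [bPop] at h; exact List.mem_cons_of_mem _ h
  | o :: os, [] => simpa [bPop] using h
  | o :: os, g :: gs =>
      by_cases hle : o ≤ g
      · simpa [bPop, hle] using h
      · simp only [bPop, if_neg hle] at h; exact List.mem_cons_of_mem _ h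

-- the minimum of a permutation is invariant
theorem heapTop_perm {l1 l2 : List Int} (h : l1.Perm l2) : heapTop l1 = heapTop l2 := by
  unfold heapTop
  rcases hm1 : PySem.List.min? l1 (fun x => x) with _ | m1 <;>
    rcases hm2 : PySem.List.min? l2 (fun x => x) with _ | m2
  · rfl
  · have h1 : l1 = [] := (PySem.List.min?_eq_none_iff l1 (fun x => x)).mp hm1
    subst h1
    have h2 : l2 = [] := h.symm.eq_nil
    rw [(PySem.List.min?_eq_none_iff l2 (fun x => x)).mpr h2] at hm2
    cases hm2
  · have h2 : l2 = [] := (PySem.List.min?_eq_none_iff l2 (fun x => x)).mp hm2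
    subst h2
    have h1 : l1 = [] := h.eq_nil
    rw [(PySem.List.min?_eq_none_iff l1 (fun x => x)).mpr h1] at hm1
    cases hm1
  · have h1m : m1 ∈ l1 := PySem.List.min?_mem hm1
    have h2m : m2 ∈ l2 := PySem.List.min?_mem hm2
    have h12 : m1 ≤ m2 := PySem.List.min?_isMin hm1 m2 (h.mem_iff.mpr h2m)
    have h21 : m2 ≤ m1 := PySem.List.min?_isMin hm2 m1 (h.mem_iff.mp h1m)
    simp [le_antisymm h12 h21]

-- the head of a ≤-sorted nonempty list is the minimum
theorem heapTop_sorted_cons (a : Int) (t : List Int)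
    (h : (a :: t).Pairwise (· ≤ ·)) : heapTop (a :: t) = a := by
  unfold heapTop
  rcases hm : PySem.List.min? (a :: t) (fun x => x) with _ | m
  · have := (PySem.List.min?_eq_none_iff (a :: t) (fun x => x)).mp hm
    cases this
  have hmem : m ∈ (a :: t) := PySem.List.min?_mem hm
  have hma : m ≤ a := PySem.List.min?_isMin hm a (by simp)
  have ham : a ≤ m := by
    rcases List.mem_cons.mp hmem with h' | h'
    · omega
    · exact (List.pairwise_cons.mp h).1 m h'
  simp [le_antisymm hma ham]

theorem heapTop_of_perm_sorted {l : List Int} {m : Int} {M' : List Int}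
    (hp : l.Perm (m :: M')) (hs : (m :: M').Pairwise (· ≤ ·)) : heapTop l = m :=
  (heapTop_perm hp).trans (heapTop_sorted_cons m M' hs)

-- every surviving generated value is at most the newly combined value a + 2b
theorem survivor_le {O G O2 G2 : List Int} {a b : Int} {rest : List Int} {w : Int}
    (hM : mrg O G = a :: b :: rest)
    (hMs : (a :: b :: rest).Pairwise (· ≤ ·))
    (hInv : InvG G (mrg O G))
    (h1 : mrg (bPop O G).2.1 (bPop O G).2.2 = b :: rest)
    (h2 : (bPop (bPop O G).2.1 (bPop O G).2.2).2.1 = O2 ∧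
          (bPop (bPop O G).2.1 (bPop O G).2.2).2.2 = G2)
    (hrest : mrg O2 G2 = rest)
    (hw : w ∈ G2) : w ≤ a + 2 * b := by
  -- w is in the surviving pool (= rest) and in the original generated queue G
  have hwrest : w ∈ rest := by
    have h' : w ∈ mrg O2 G2 := (mrg_perm O2 G2).mem_iff.mpr (by simp [hw])
    rwa [hrest] at h'
  have hwG : w ∈ G := by
    have := bPop_mem_gen (O := (bPop O G).2.1) (G := (bPop O G).2.2) (h2.2 ▸ hw)
    exact bPop_mem_gen this
  -- bounds from sortedness of a :: b :: rest
  have hab : a ≤ b := (List.pairwise_cons.mp hMs).1 b (by simp)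
  have hbrest : ∀ x ∈ rest, b ≤ x := fun x hx =>
    (List.pairwise_cons.mp (hMs.of_cons)).1 x (by simp [hx])
  have hrestS : rest.Pairwise (· ≤ ·) := hMs.of_cons.of_cons
  rcases hr : rest with _ | ⟨r0, rtl⟩
  · subst hr; cases hwrest
  have hr0w : r0 ≤ w := by
    rcases List.mem_cons.mp (hr ▸ hwrest) with h | h
    · omega
    · exact (List.pairwise_cons.mp (hr ▸ hrestS)).1 w h
  have hbr0 : b ≤ r0 := hbrest r0 (by simp [hr])
  have hinvw := hInv w hwG
  rw [hM] at hinvw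
  by_cases hwa : a = w
  · -- w = a: then a = b = r0 and the invariant gives a ≤ b + 2r0
    have : (a :: b :: rest).erase w = b :: rest := by
      simp [hwa]
    have hIneq := hinvw b r0 rtl (by rw [this, hr])
    have hwr : w ∈ rest := hwrest
    have : b ≤ w := hbrest w hwr
    omega
  · by_cases hwb : b = w
    · have : (a :: b :: rest).erase w = a :: rest := by
        simp [hwa, hwb]
      have hIneq := hinvw a r0 rtl (by rw [this, hr])
      omega
    · have : (a :: b :: rest).erase w = a :: b :: rest.erase w := by
        simp [hwa, hwb]
      exact hinvw a b (rest.erase w) (by rw [this, hr])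

-- the new merged pool is the ordered insertion of the combined value into the rest
theorem mrg_new_pool {O2 G2 : List Int} {v : Int} {rest : List Int}
    (hO2 : O2.Pairwise (· ≤ ·)) (hG2v : (G2 ++ [v]).Pairwise (· ≤ ·))
    (hrest : mrg O2 G2 = rest) :
    mrg O2 (G2 ++ [v]) = List.orderedInsert (· ≤ ·) v rest := by
  have hG2 : G2.Pairwise (· ≤ ·) := hG2v.sublist (List.sublist_append_left _ _)
  have h1 : (O2 ++ G2).Perm rest := (hrest ▸ mrg_perm O2 G2).symm
  have hperm : (mrg O2 (G2 ++ [v])).Perm (List.orderedInsert (· ≤ ·) v rest) := by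
    refine (mrg_perm _ _).trans ?_
    rw [← List.append_assoc]
    exact ((List.perm_append_singleton v (O2 ++ G2)).trans (h1.cons v)).trans
      (List.perm_orderedInsert _ _ _).symm
  exact List.eq_of_perm_of_sorted (fun a b _ _ hx hy => le_antisymm hx hy)
    (mrg_pairwise _ _ hO2 hG2v)
    (List.Pairwise.orderedInsert _ _ (hrest ▸ mrg_pairwise _ _ hO2 hG2)) hperm

-- preservation of the generated-queue invariant across one combine step
theorem invG_step {O2 G2 : List Int} {a b : Int} {rest : List Int}
    (hMs : (a :: b :: rest).Pairwise (· ≤ ·))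
    (hO2 : O2.Pairwise (· ≤ ·)) (hG2 : G2.Pairwise (· ≤ ·))
    (hrest : mrg O2 G2 = rest)
    (hsurv : ∀ w ∈ G2, w ≤ a + 2 * b) :
    InvG (G2 ++ [a + 2 * b]) (mrg O2 (G2 ++ [a + 2 * b])) := by
  have hab : a ≤ b := (List.pairwise_cons.mp hMs).1 b (by simp)
  have hbrest : ∀ x ∈ rest, b ≤ x := fun x hx =>
    (List.pairwise_cons.mp (hMs.of_cons)).1 x (by simp [hx])
  have hG2v : (G2 ++ [a + 2 * b]).Pairwise (· ≤ ·) := by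
    refine List.pairwise_append.mpr ⟨hG2, by simp, ?_⟩
    intro w hwG2 y hy
    rcases List.mem_singleton.mp hy with rfl
    exact hsurv w hwG2
  have hpool : mrg O2 (G2 ++ [a + 2 * b]) = List.orderedInsert (· ≤ ·) (a + 2 * b) rest :=
    mrg_new_pool hO2 hG2v hrest
  intro w hwmem x y r hxy
  have hmemP : ∀ z ∈ mrg O2 (G2 ++ [a + 2 * b]), z = a + 2 * b ∨ b ≤ z := by
    intro z hz
    have hzrest : z ∈ O2 ∨ z ∈ G2 → b ≤ z := by
      intro hz'
      have h' : z ∈ mrg O2 G2 := (mrg_perm O2 G2).mem_iff.mpr (by rcases hz' with h|h <;> simp [h])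
      exact hbrest z (by rwa [hrest] at h')
    rcases mem_mrg hz with hz | hz
    · exact Or.inr (hzrest (Or.inl hz))
    · rcases List.mem_append.mp hz with hz | hz
      · exact Or.inr (hzrest (Or.inr hz))
      · exact Or.inl (List.mem_singleton.mp hz)
  rcases List.mem_append.mp hwmem with hwG2 | hwv
  · -- surviving generated value: membership bounds suffice
    have hwle : w ≤ a + 2 * b := hsurv w hwG2
    have hwb : b ≤ w := by
      have h' : w ∈ mrg O2 G2 := (mrg_perm O2 G2).mem_iff.mpr (by simp [hwG2])
      exact hbrest w (by rwa [hrest] at h')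
    have hxmem : x ∈ mrg O2 (G2 ++ [a + 2 * b]) :=
      List.mem_of_mem_erase (by rw [hxy]; simp)
    have hymem : y ∈ mrg O2 (G2 ++ [a + 2 * b]) :=
      List.mem_of_mem_erase (by rw [hxy]; simp)
    rcases hmemP x hxmem with hx | hx <;> rcases hmemP y hymem with hy | hy <;> omega
  · -- the freshly appended value: erase removes the inserted copy
    rcases List.mem_singleton.mp hwv with rfl
    rw [hpool, List.erase_orderedInsert] at hxy
    have hbx : b ≤ x := hbrest x (by rw [hxy]; simp)
    have hby : b ≤ y := hbrest y (by rw [hxy]; simp)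
    omega

-- the master correspondence: A's min-extraction loop equals B's two-queue loop
theorem loop_eq (K : Int) : ∀ (fuel : Nat) (l O G : List Int) (ans : Int),
    O.Pairwise (· ≤ ·) → G.Pairwise (· ≤ ·) → InvG G (mrg O G) → l.Perm (O ++ G) →
    solutionLoop K fuel l ans = bLoop K fuel O G ans := by
  intro fuel
  induction fuel with
  | zero =>
      intro l O G ans hO hG _ hperm
      have hpm : l.Perm (mrg O G) := hperm.trans (mrg_perm O G).symm
      rcases hM : mrg O G with _ | ⟨m, M'⟩
      · have hl : l = [] := by rw [hM] at hpm; exact hpm.eq_nil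
        subst hl
        have h0 : O ++ G = [] := hperm.symm.eq_nil
        rcases List.append_eq_nil_iff.mp h0 with ⟨h1, h2⟩
        subst h1; subst h2
        simp [solutionLoop, bLoop, bMin, heapTop, PySem.List.min?]
      · have hs : (m :: M').Pairwise (· ≤ ·) := hM ▸ mrg_pairwise O G hO hG
        have htop : heapTop l = m := heapTop_of_perm_sorted (hM ▸ hpm) hs
        simp [solutionLoop, bLoop, htop, bMin_mrg hM]
  | succ fuel ih =>
      intro l O G ans hO hG hInv hperm
      have hpm : l.Perm (mrg O G) := hperm.trans (mrg_perm O G).symm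
      rcases hM : mrg O G with _ | ⟨a, M1⟩
      · have hl : l = [] := by rw [hM] at hpm; exact hpm.eq_nil
        subst hl
        have h0 : O ++ G = [] := hperm.symm.eq_nil
        rcases List.append_eq_nil_iff.mp h0 with ⟨h1, h2⟩
        subst h1; subst h2
        simp [solutionLoop, bLoop, bMin, heapTop, PySem.List.min?]
      rcases hM1 : M1 with _ | ⟨b, rest⟩
      · -- singleton pool: the loop body never runs on either side
        subst hM1
        have hs : ([a] : List Int).Pairwise (· ≤ ·) := hM ▸ mrg_pairwise O G hO hG
        have htop : heapTop l = a := heapTop_of_perm_sorted (hM ▸ hpm) hs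
        have hlen : l.length = 1 := by simpa using (hM ▸ hpm).length_eq
        have hlenOG : O.length + G.length = 1 := by
          have h' := (mrg_perm O G).length_eq
          rw [hM] at h'
          simpa using h'.symm
        have hA : solutionLoop K (fuel + 1) l ans = if heapTop l < K then -1 else ans := by
          rw [solutionLoop, if_neg (by rintro ⟨h1, _⟩; omega)]
        have hB : bLoop K (fuel + 1) O G ans = if bMin O G < K then -1 else ans := by
          rw [bLoop, if_neg (by rintro ⟨h1, _⟩; omega)]
        rw [hA, hB, htop, bMin_mrg hM]
      subst hM1
      have hMs : (a :: b :: rest).Pairwise (· ≤ ·) := hM ▸ mrg_pairwise O G hO hG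
      have htop : heapTop l = a := heapTop_of_perm_sorted (hM ▸ hpm) hMs
      have hlen : l.length = rest.length + 2 := by simpa using (hM ▸ hpm).length_eq
      have hlenOG : O.length + G.length = rest.length + 2 := by
        have h' := (mrg_perm O G).length_eq
        rw [hM] at h'
        simpa using h'.symm
      by_cases hK : a < K
      · -- one combine step, then the induction hypothesis
        obtain ⟨hp1a, hp1m⟩ := bPop_spec O G a (b :: rest) hM
        obtain ⟨hp2a, hp2m⟩ := bPop_spec _ _ b rest hp1m
        have hO1G1 := bPop_pairwise hO hG
        have hO2G2 := bPop_pairwise hO1G1.1 hO1G1.2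
        have hpe1 : (l.erase a).Perm (b :: rest) := by
          have h' := hpm.erase a
          rw [hM, List.erase_cons_head] at h'
          exact h'
        have htop1 : heapTop (l.erase a) = b := heapTop_of_perm_sorted hpe1 hMs.of_cons
        have hpe2 : ((l.erase a).erase b).Perm rest := by
          have h' := hpe1.erase b
          rw [List.erase_cons_head] at h'
          exact h'
        have hsurv : ∀ w ∈ (bPop (bPop O G).2.1 (bPop O G).2.2).2.2,
            w ≤ a + 2 * b := fun w hw =>
          survivor_le hM hMs hInv hp1m ⟨rfl, rfl⟩ hp2m hw
        have hG2v : ((bPop (bPop O G).2.1 (bPop O G).2.2).2.2 ++ [a + 2 * b]).Pairwise (· ≤ ·) := by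
          refine List.pairwise_append.mpr ⟨hO2G2.2, by simp, ?_⟩
          intro w hwG2 y hy
          rcases List.mem_singleton.mp hy with rfl
          exact hsurv w hwG2
        have hInv' := invG_step hMs hO2G2.1 hO2G2.2 hp2m hsurv
        have hperm' :
            ((a + b * 2) :: ((l.erase a).erase b)).Perm
              ((bPop (bPop O G).2.1 (bPop O G).2.2).2.1 ++
               ((bPop (bPop O G).2.1 (bPop O G).2.2).2.2 ++ [a + 2 * b])) := by
          have harith : a + b * 2 = a + 2 * b := by ring
          rw [harith, ← List.append_assoc]
          have h1 : ((l.erase a).erase b).Perm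
              ((bPop (bPop O G).2.1 (bPop O G).2.2).2.1 ++
               (bPop (bPop O G).2.1 (bPop O G).2.2).2.2) :=
            hpe2.trans (hp2m ▸ mrg_perm _ _)
          exact (h1.cons _).trans (List.perm_append_singleton _ _).symm
        have hA : solutionLoop K (fuel + 1) l ans =
            solutionLoop K fuel ((a + b * 2) :: ((l.erase a).erase b)) (ans + 1) := by
          rw [solutionLoop, if_pos ⟨by omega, by rw [htop]; exact hK⟩, htop, htop1]
        have hB : bLoop K (fuel + 1) O G ans =
            bLoop K fuel (bPop (bPop O G).2.1 (bPop O G).2.2).2.1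
              ((bPop (bPop O G).2.1 (bPop O G).2.2).2.2 ++ [a + 2 * b]) (ans + 1) := by
          rw [bLoop]
          rw [if_pos ⟨by omega, by rw [bMin_mrg hM]; exact hK⟩]
          simp only [hp1a, hp2a]
        rw [hA, hB]
        exact (ih _ _ _ (ans + 1) hO2G2.1 hG2v hInv' hperm')
      · -- loop guard false on both sides
        have hA : solutionLoop K (fuel + 1) l ans = if heapTop l < K then -1 else ans := by
          rw [solutionLoop, if_neg (by rintro ⟨_, h2⟩; rw [htop] at h2; omega)]
        have hB : bLoop K (fuel + 1) O G ans = if bMin O G < K then -1 else ans := by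
          rw [bLoop, if_neg (by rintro ⟨_, h2⟩; rw [bMin_mrg hM] at h2; omega)]
        rw [hA, hB, htop, bMin_mrg hM]

-- ===== VERDICT (by name: the statement is the Claim_ definition above) =====
theorem solution_spec : Claim_equal_solution := by
  intro scoville K _ _
  unfold Spec_solution solution solution_alt
  refine loop_eq K scoville.length scoville (PySem.List.sorted scoville (fun x => x) false) [] 0
    (PySem.List.sorted_pairwise scoville (fun x => x)) List.Pairwise.nil
    (by intro w hw; cases hw) ?_
  simpa using (PySem.List.sorted_perm scoville (fun x => x) false).symm
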